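-- pv_equiv track=rewrite | github.com/Gmt-santos/Calculadora | calculadora/calculadora/calculadora_projeto.py | empacotar_lista_numeros_dps_sinal
-- ===== SOURCE A (Python) =====
-- def empacotar_lista_numeros_dps_sinal(texto):
--     lista=[]
--     permissao=False
--     for n in texto:
--         if n in "=":
--            permissao=True
--         if permissao == True and n != "=":
--             lista.append(n)
--
--     return lista
-- ===== SOURCE B (Python) =====
-- def empacotar_lista_numeros_dps_sinal(texto):
--     return list(''.join(texto.split('=')[1:]))
-- ===== Notes on version B (the rewrite author's own statement) =====
-- stated objective: faster
-- what changed: Replaced the boolean-flag per-character loop with split on the separator, drop the first segment, join the rest and list the characters.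
import Mathlib
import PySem

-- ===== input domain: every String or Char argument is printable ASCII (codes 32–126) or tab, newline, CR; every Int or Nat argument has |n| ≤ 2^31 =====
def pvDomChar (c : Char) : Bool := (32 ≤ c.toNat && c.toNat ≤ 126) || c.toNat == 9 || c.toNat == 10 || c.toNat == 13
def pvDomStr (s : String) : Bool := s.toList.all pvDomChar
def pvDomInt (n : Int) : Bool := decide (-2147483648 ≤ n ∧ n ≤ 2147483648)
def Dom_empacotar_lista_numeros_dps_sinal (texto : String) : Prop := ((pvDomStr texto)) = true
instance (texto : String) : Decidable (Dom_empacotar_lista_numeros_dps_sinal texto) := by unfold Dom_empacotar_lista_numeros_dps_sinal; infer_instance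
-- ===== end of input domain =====

-- B replaces A's boolean-flag single pass by split-on-'='/drop-first/join (idiomatic); return values proved equal on all inputs.

-- ===== PORT A =====
-- flag loop: permissao set at the first '='; afterwards every non-'=' char is appended
def pvStepA (st : List String × Bool) (n : Char) : List String × Bool :=
  let permissao := if n == '=' then true else st.2
  if permissao && !(n == '=') then (st.1 ++ [String.ofList [n]], permissao)
  else (st.1, permissao)

def empacotar_lista_numeros_dps_sinal (texto : String) : List String :=
  (texto.toList.foldl pvStepA ([], false)).1

-- ===== PORT B =====
-- list(''.join(texto.split('=')[1:])); "=" ≠ "" so split? always returns some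
def empacotar_lista_numeros_dps_sinal_alt (texto : String) : List String :=
  ((PySem.Str.join "" (((PySem.Str.split? texto "=").getD []).drop 1)).toList).map
    (fun c => String.ofList [c])

-- ===== PRECONDITION & SPEC =====
def Spec_empacotar_lista_numeros_dps_sinal (texto : String) (out : List String) : Prop := out = empacotar_lista_numeros_dps_sinal_alt texto
instance (texto : String) (out : List String) : Decidable (Spec_empacotar_lista_numeros_dps_sinal texto out) := by unfold Spec_empacotar_lista_numeros_dps_sinal; infer_instance

-- ===== CLAIM (what is proved, stated in full; the proofs are below) =====
def Claim_equal_empacotar_lista_numeros_dps_sinal : Prop := ∀ (texto : String), Dom_empacotar_lista_numeros_dps_sinal texto → Spec_empacotar_lista_numeros_dps_sinal texto (empacotar_lista_numeros_dps_sinal texto)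

-- ===== LEMMAS AND PROOFS =====

-- simple structural form of split on a single-character separator
def pvMySplit (c : Char) (pre : List Char) : List Char → List (List Char)
  | [] => [pre]
  | x :: xs => if x = c then pre :: pvMySplit c [] xs else pvMySplit c (pre ++ [x]) xs

-- simple structural form of A's flag loop, over chars
def pvCollect (b : Bool) : List Char → List Char
  | [] => []
  | x :: xs =>
    let b' := if x = '=' then true else b
    if b' && !(x = '=') then x :: pvCollect b' xs else pvCollect b' xs

theorem pvStepA_eq (st : List String × Bool) (n : Char) :
    pvStepA st n = if (n = '=' ∨ st.2 = true) ∧ ¬ n = '='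
      then (st.1 ++ [String.ofList [n]], (n = '=' : Bool) || st.2)
      else (st.1, (n = '=' : Bool) || st.2) := by
  by_cases hn : n = '=' <;> by_cases hb : st.2 <;> simp [pvStepA, hn, hb]

theorem pvCollect_cons (b : Bool) (x : Char) (xs : List Char) :
    pvCollect b (x :: xs) = if x = '=' then pvCollect true xs
      else (if b then x :: pvCollect b xs else pvCollect b xs) := by
  by_cases hx : x = '=' <;> by_cases hb : b <;> simp [pvCollect, hx, hb]

theorem pvFoldl_eq (l : List Char) (lista : List String) (b : Bool) :
    (l.foldl pvStepA (lista, b)).1 = lista ++ (pvCollect b l).map (fun c => String.ofList [c]) := by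
  induction l generalizing lista b with
  | nil => simp [pvCollect]
  | cons x xs ih =>
    rw [List.foldl_cons, pvStepA_eq]
    by_cases hx : x = '='
    · rw [if_neg (by simp [hx]), ih, pvCollect_cons]
      simp [hx]
    · by_cases hb : b
      · rw [if_pos (by simp [hb, hx]), ih, pvCollect_cons]
        simp [hx, hb]
      · rw [if_neg (by simp [hx, hb]), ih, pvCollect_cons]
        simp [hx, hb]

theorem pvGo_eq (c : Char) (fuel : Nat) (l cur : List Char) (acc : List (List Char))
    (h : l.length < fuel) :
    PySem.Chars.splitOn.go [c] fuel l cur acc = acc.reverse ++ pvMySplit c cur.reverse l := by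
  induction fuel generalizing l cur acc with
  | zero => omega
  | succ fuel ih =>
    cases l with
    | nil => simp [PySem.Chars.splitOn.go, pvMySplit]
    | cons x xs =>
      by_cases hx : x = c
      · have hpre : List.isPrefixOf [c] (x :: xs) = true := by
          simp [List.isPrefixOf, hx]
        rw [PySem.Chars.splitOn.go, if_pos hpre]
        simp only [List.length_cons] at h
        rw [ih _ _ _ (by simpa using Nat.lt_of_succ_lt_succ h)]
        simp [pvMySplit, hx]
      · have hpre : List.isPrefixOf [c] (x :: xs) = false := by
          simp [List.isPrefixOf]; exact fun h => hx h.symm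
        rw [PySem.Chars.splitOn.go, if_neg (by simp [hpre])]
        simp only [List.length_cons] at h
        rw [ih xs (x :: cur) acc (by omega)]
        simp [pvMySplit, hx]

theorem pvSplitOn_eq (c : Char) (l : List Char) :
    PySem.Chars.splitOn l [c] = pvMySplit c [] l := by
  have := pvGo_eq c (l.length + 1) l [] [] (by omega)
  simpa [PySem.Chars.splitOn] using this

theorem pvJoinNil (ps : List (List Char)) : PySem.Chars.join [] ps = ps.flatten := by
  induction ps with
  | nil => simp [PySem.Chars.join, List.intercalate]
  | cons p ps ih =>
    cases ps with
    | nil => simp [PySem.Chars.join, List.intercalate]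
    | cons q qs =>
      simp [PySem.Chars.join, List.intercalate, List.intersperse] at *
      simpa using ih

theorem pvCollect_true (l : List Char) : pvCollect true l = l.filter (fun x => x ≠ '=') := by
  induction l with
  | nil => simp [pvCollect]
  | cons x xs ih =>
    by_cases hx : x = '=' <;> simp [pvCollect, hx, ih, List.filter]

theorem pvMySplit_flatten (l pre : List Char) :
    (pvMySplit '=' pre l).flatten = pre ++ l.filter (fun x => x ≠ '=') := by
  induction l generalizing pre with
  | nil => simp [pvMySplit]
  | cons x xs ih =>
    by_cases hx : x = '=' <;> simp [pvMySplit, hx, ih, List.filter]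

theorem pvMain (l pre : List Char) :
    ((pvMySplit '=' pre l).drop 1).flatten = pvCollect false l := by
  induction l generalizing pre with
  | nil => simp [pvMySplit, pvCollect]
  | cons x xs ih =>
    by_cases hx : x = '='
    · simp [pvMySplit, pvCollect, hx, pvMySplit_flatten, pvCollect_true]
    · rw [show pvMySplit '=' pre (x :: xs) = pvMySplit '=' (pre ++ [x]) xs from by
        simp [pvMySplit, hx]]
      rw [ih, pvCollect_cons]
      simp [hx]

-- ===== VERDICT (by name: the statement is the Claim_ definition above) =====
theorem empacotar_lista_numeros_dps_sinal_spec : Claim_equal_empacotar_lista_numeros_dps_sinal := by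
  intro texto _
  unfold Spec_empacotar_lista_numeros_dps_sinal
  unfold empacotar_lista_numeros_dps_sinal empacotar_lista_numeros_dps_sinal_alt
  rw [pvFoldl_eq]
  have hsp := PySem.Str.split?_map texto "="
  rw [show ("=" : String).toList = ['='] from rfl] at hsp
  rw [PySem.Chars.split?] at hsp
  simp only [List.isEmpty_cons] at hsp
  rw [if_neg (by simp)] at hsp
  cases hq : PySem.Str.split? texto "=" with
  | none => rw [hq] at hsp; simp at hsp
  | some ps =>
    rw [hq] at hsp
    simp only [Option.map_some, Option.some.injEq] at hsp
    replace hsp : List.map String.toList ps = PySem.Chars.splitOn texto.toList ['='] := by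
      simpa using hsp
    simp only [Option.getD_some]
    rw [PySem.Str.toList_join, show ("" : String).toList = [] from rfl]
    rw [show List.map String.toList (List.drop 1 ps) = List.drop 1 (List.map String.toList ps) from
      List.map_drop .., hsp, pvSplitOn_eq, pvJoinNil, pvMain]
    simp
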